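-- pv_equiv track=rewrite | github.com/sahilbhatt89/Quantized-CNN | convoulation.py | convolve3d
-- ===== SOURCE A (Python) =====
-- def convolve3d(image, kernel):
--      C = len(image)           # Number of channels (3 for RGB)
--      H = len(image[0])        # Height
--      W = len(image[0][0])     # Width
--      kH = len(kernel[0])      # Kernel height
--      kW = len(kernel[0][0])   # Kernel width
--
--      out_H = H - kH + 1
--      out_W = W - kW + 1
--
--      output = [[0 for _ in range(out_W)] for _ in range(out_H)]
--
--      for i in range(out_H):
--          for j in range(out_W):
--              val = 0
--              for c in range(C):
--                  for m in range(kH):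
--                      for n in range(kW):
--                          val += image[c][i + m][j + n] * kernel[c][m][n]
--              output[i][j] = val
--      return output
-- ===== SOURCE B (Python) =====
-- def convolve3d(image, kernel):
--     C = len(image)
--     H = len(image[0])
--     W = len(image[0][0])
--     kH = len(kernel[0])
--     kW = len(kernel[0][0])
--
--     out_H = H - kH + 1
--     out_W = W - kW + 1
--
--     if out_H <= 0 or out_W <= 0:
--         # no valid window positions in some direction: empty output grid
--         return [[] for _ in range(out_H)]
--
--     # im2col: flatten the kernel once (c, m, n order), build the patch matrix
--     # of flattened windows in the same order, dot each row with the kernel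
--     # vector, then reshape the flat result into the output grid by slicing.
--     kvec = [kernel[c][m][n]
--             for c in range(C) for m in range(kH) for n in range(kW)]
--     patches = [[image[c][i + m][j + n]
--                 for c in range(C) for m in range(kH) for n in range(kW)]
--                for i in range(out_H) for j in range(out_W)]
--     dots = [sum(p * k for p, k in zip(row, kvec)) for row in patches]
--     return [dots[i * out_W:(i + 1) * out_W] for i in range(out_H)]
-- ===== Notes on version B (the rewrite author's own statement) =====
-- stated objective: alternative
-- what changed: B uses an im2col decomposition with a natural empty-output early exit: it flattens the kernel once into a vector, builds a patch matrix of flattened windows (same c,m,n order), computes each output value as a row-by-kernel dot product over zipped vectors, and reshapes the flat result by slicing, instead of A's five nested loops writing into a preallocated mutable grid.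
import Mathlib
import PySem

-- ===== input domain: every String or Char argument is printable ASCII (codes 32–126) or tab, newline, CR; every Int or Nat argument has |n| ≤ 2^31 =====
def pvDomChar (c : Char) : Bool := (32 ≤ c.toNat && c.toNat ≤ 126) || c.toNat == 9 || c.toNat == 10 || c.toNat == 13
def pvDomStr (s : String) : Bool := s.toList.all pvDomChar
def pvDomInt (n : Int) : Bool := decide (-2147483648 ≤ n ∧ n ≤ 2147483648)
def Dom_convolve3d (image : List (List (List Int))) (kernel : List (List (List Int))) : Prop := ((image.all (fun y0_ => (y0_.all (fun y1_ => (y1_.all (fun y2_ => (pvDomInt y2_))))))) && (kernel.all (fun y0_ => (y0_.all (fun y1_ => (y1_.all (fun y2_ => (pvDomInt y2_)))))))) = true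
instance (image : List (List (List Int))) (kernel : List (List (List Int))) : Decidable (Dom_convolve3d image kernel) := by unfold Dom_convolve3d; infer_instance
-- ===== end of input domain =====

-- B replaces A's five nested mutating loops by an im2col decomposition (flattened kernel
-- vector, patch matrix, row dot products, reshape by slicing); same asymptotic cost.

-- shared indexing helper: x[c][r][n] with Python IndexError excluded by Pre_ (defaults never read under Pre_)
def pvGet3 (x : List (List (List Int))) (c r n : Int) : Int :=
  PySem.List.pyGetD (PySem.List.pyGetD (PySem.List.pyGetD x c []) r []) n 0

-- ===== PORT A =====
def convolve3d (image : List (List (List Int))) (kernel : List (List (List Int))) : List (List Int) :=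
  let C : Int := image.length
  let H : Int := (PySem.List.pyGetD image 0 []).length
  let W : Int := (PySem.List.pyGetD (PySem.List.pyGetD image 0 []) 0 []).length
  let kH : Int := (PySem.List.pyGetD kernel 0 []).length
  let kW : Int := (PySem.List.pyGetD (PySem.List.pyGetD kernel 0 []) 0 []).length
  let outH : Int := H - kH + 1
  let outW : Int := W - kW + 1
  let output : List (List Int) :=
    (PySem.List.pyRange 0 outH 1).map (fun _ => (PySem.List.pyRange 0 outW 1).map (fun _ => (0 : Int)))
  (PySem.List.pyRange 0 outH 1).foldl (fun output i =>
    (PySem.List.pyRange 0 outW 1).foldl (fun output j =>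
      let val : Int := (PySem.List.pyRange 0 C 1).foldl (fun val c =>
        (PySem.List.pyRange 0 kH 1).foldl (fun val m =>
          (PySem.List.pyRange 0 kW 1).foldl (fun val n =>
            val + pvGet3 image c (i + m) (j + n) * pvGet3 kernel c m n) val) val) 0
      -- output[i][j] = val
      PySem.List.pySetD output i (PySem.List.pySetD (PySem.List.pyGetD output i []) j val)) output) output

-- ===== PORT B =====
def convolve3d_alt (image : List (List (List Int))) (kernel : List (List (List Int))) : List (List Int) :=
  let C : Int := image.length
  let H : Int := (PySem.List.pyGetD image 0 []).length
  let W : Int := (PySem.List.pyGetD (PySem.List.pyGetD image 0 []) 0 []).length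
  let kH : Int := (PySem.List.pyGetD kernel 0 []).length
  let kW : Int := (PySem.List.pyGetD (PySem.List.pyGetD kernel 0 []) 0 []).length
  let outH : Int := H - kH + 1
  let outW : Int := W - kW + 1
  if outH ≤ 0 ∨ outW ≤ 0 then
    -- no valid window positions in some direction: empty output grid
    (PySem.List.pyRange 0 outH 1).map (fun _ => ([] : List Int))
  else
  let kvec : List Int :=
    (PySem.List.pyRange 0 C 1).flatMap (fun c =>
      (PySem.List.pyRange 0 kH 1).flatMap (fun m =>
        (PySem.List.pyRange 0 kW 1).map (fun n => pvGet3 kernel c m n)))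
  let patches : List (List Int) :=
    (PySem.List.pyRange 0 outH 1).flatMap (fun i =>
      (PySem.List.pyRange 0 outW 1).map (fun j =>
        (PySem.List.pyRange 0 C 1).flatMap (fun c =>
          (PySem.List.pyRange 0 kH 1).flatMap (fun m =>
            (PySem.List.pyRange 0 kW 1).map (fun n => pvGet3 image c (i + m) (j + n))))))
  let dots : List Int :=
    patches.map (fun row => ((row.zip kvec).map (fun pk => pk.1 * pk.2)).sum)
  (PySem.List.pyRange 0 outH 1).map (fun i =>
    PySem.List.slice dots (some (i * outW)) (some ((i + 1) * outW)))

-- ===== PRECONDITION & SPEC =====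
-- Pre_ = exactly the inputs on which the Python A returns normally (no IndexError): the four
-- dimension reads succeed, and whenever the loop body actually indexes (kH <= H, kW <= W, 1 <= kW)
-- every touched index is in range (first H rows of each image channel have >= W entries, at least
-- C kernel channels whose first kH rows have >= kW entries).
def Pre_convolve3d (image : List (List (List Int))) (kernel : List (List (List Int))) : Prop :=
  image ≠ [] ∧ image.getD 0 [] ≠ [] ∧ kernel ≠ [] ∧ kernel.getD 0 [] ≠ [] ∧
  ((kernel.getD 0 []).length ≤ (image.getD 0 []).length ∧
   ((kernel.getD 0 []).getD 0 []).length ≤ ((image.getD 0 []).getD 0 []).length ∧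
   0 < ((kernel.getD 0 []).getD 0 []).length →
     image.length ≤ kernel.length ∧
     (∀ ch ∈ image, (image.getD 0 []).length ≤ ch.length ∧
        ∀ row ∈ ch.take (image.getD 0 []).length,
          ((image.getD 0 []).getD 0 []).length ≤ row.length) ∧
     (∀ ch ∈ kernel.take image.length, (kernel.getD 0 []).length ≤ ch.length ∧
        ∀ row ∈ ch.take (kernel.getD 0 []).length,
          ((kernel.getD 0 []).getD 0 []).length ≤ row.length))
instance (image : List (List (List Int))) (kernel : List (List (List Int))) : Decidable (Pre_convolve3d image kernel) := by unfold Pre_convolve3d; infer_instance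
def pvWitness_convolve3d : List (List (List Int)) × List (List (List Int)) :=
  ([[[1, 2], [3, 4]], [[5, 6], [7, 8]]], [[[1]], [[2]]])

def Spec_convolve3d (image : List (List (List Int))) (kernel : List (List (List Int))) (out : List (List Int)) : Prop := out = convolve3d_alt image kernel
instance (image : List (List (List Int))) (kernel : List (List (List Int))) (out : List (List Int)) : Decidable (Spec_convolve3d image kernel out) := by unfold Spec_convolve3d; infer_instance

-- ===== CLAIM (what is proved, stated in full; the proofs are below) =====
def Claim_equal_convolve3d : Prop := ∀ (image : List (List (List Int))) (kernel : List (List (List Int))), Dom_convolve3d image kernel → Pre_convolve3d image kernel → Spec_convolve3d image kernel (convolve3d image kernel)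

-- ===== LEMMAS AND PROOFS =====
theorem pv_setrow {α : Type} (js : List Int) (V : Int → α) (i : Int) (hi : 0 ≤ i) :
    ∀ (out : List (List α)),
      js.foldl (fun out j => PySem.List.pySetD out i (PySem.List.pySetD (PySem.List.pyGetD out i []) j (V j))) out
      = PySem.List.pySetD out i (js.foldl (fun row j => PySem.List.pySetD row j (V j)) (PySem.List.pyGetD out i [])) := by
  induction js with
  | nil =>
    intro out
    simp only [List.foldl_nil, PySem.List.pySetD_of_nonneg _ _ hi]
    by_cases h : i.toNat < out.length
    · rw [show PySem.List.pyGetD out i [] = out.getD i.toNat [] by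
        rw [← PySem.List.pyGetD_natCast, Int.toNat_of_nonneg hi]]
      rw [List.getD_eq_getElem _ _ h, List.set_getElem_self]
    · exact (List.set_eq_of_length_le (by omega)).symm
  | cons j js ih =>
    intro out
    simp only [List.foldl_cons]
    rw [ih]
    have hget : ∀ (o : List (List α)), PySem.List.pyGetD o i [] = o.getD i.toNat [] := by
      intro o; rw [← PySem.List.pyGetD_natCast, Int.toNat_of_nonneg hi]
    simp only [PySem.List.pySetD_of_nonneg _ _ hi, hget]
    by_cases h : i.toNat < out.length
    · have h2 : (out.set i.toNat (PySem.List.pySetD (out.getD i.toNat []) j (V j))).getD i.toNat []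
          = PySem.List.pySetD (out.getD i.toNat []) j (V j) := by
        rw [List.getD_eq_getElem _ _ (by simpa using h), List.getElem_set_self]
      rw [h2, List.set_set]
    · rw [List.set_eq_of_length_le (by simp only [List.length_set]; omega),
        List.set_eq_of_length_le (by omega), List.set_eq_of_length_le (by omega)]

theorem pv_foldl_set_get {α : Type} (N : Int) (d : α) (z0 : Int → α) (g : Int → α → α) :
    ∀ (n : Nat), (n : Int) ≤ N →
      (PySem.List.pyRange 0 (n : Int) 1).foldl
          (fun out i => PySem.List.pySetD out i (g i (PySem.List.pyGetD out i d)))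
          ((PySem.List.pyRange 0 N 1).map z0)
      = (PySem.List.pyRange 0 N 1).map (fun i => if i < (n : Int) then g i (z0 i) else z0 i) := by
  intro n
  induction n with
  | zero =>
    intro _
    rw [Nat.cast_zero, PySem.List.pyRange_one_eq_nil (le_refl 0), List.foldl_nil]
    refine (List.map_congr_left ?_).symm
    intro i hi
    rw [if_neg (by have := (PySem.List.mem_pyRange_one.1 hi).1; omega)]
  | succ n ih =>
    intro hle
    have hn : (n : Int) ≤ N := by push_cast at hle ⊢; omega
    have hcast : ((n + 1 : Nat) : Int) = (n : Int) + 1 := by push_cast; ring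
    rw [hcast, PySem.List.pyRange_one_succ_right (Int.natCast_nonneg n), List.foldl_append,
      List.foldl_cons, List.foldl_nil, ih hn]
    rw [PySem.List.pyGetD_map_pyRange_of_nonneg _ N _ d (Int.natCast_nonneg n) (by omega),
      if_neg (lt_irrefl _), PySem.List.pySetD_natCast]
    apply List.ext_getElem
    · simp
    · intro k h1 h2
      rw [List.getElem_set]
      simp only [List.getElem_map, PySem.List.getElem_pyRange_one]
      by_cases hk : n = k
      · subst hk
        rw [if_pos rfl, if_pos (by omega)]
        norm_num
      · rw [if_neg hk]
        by_cases hlt : ((0 : Int) + (k : Int)) < (n : Int)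
        · rw [if_pos hlt, if_pos (by omega)]
        · rw [if_neg hlt, if_neg (by omega)]

theorem pv_sum_flatMap {β : Type} (l : List β) (g : β → List Int) :
    (l.flatMap g).sum = (l.map (fun a => (g a).sum)).sum := by
  rw [List.flatMap_def, List.sum_flatten, List.map_map]
  rfl

theorem pv_slice_flatMap {α : Type} (hN w : Nat) (blk : Int → List α)
    (hw : ∀ i : Int, 0 ≤ i → i < (hN : Int) → (blk i).length = w) (i : Nat) (hi : i < hN) :
    PySem.List.slice ((PySem.List.pyRange 0 (hN : Nat) 1).flatMap blk)
        (some ((i : Int) * (w : Int))) (some (((i : Int) + 1) * (w : Int)))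
    = blk (i : Int) := by
  rw [PySem.List.pyRange_one_append 0 (i : Int) (hN : Int) (Int.natCast_nonneg i) (by exact_mod_cast hi.le),
    PySem.List.pyRange_one_cons (a := (i : Int)) (b := (hN : Int)) (by exact_mod_cast hi),
    List.flatMap_append, List.flatMap_cons]
  rw [show (i : Int) * (w : Int) = ((i * w : Nat) : Int) by push_cast; ring,
    show ((i : Int) + 1) * (w : Int) = (((i + 1) * w : Nat) : Int) by push_cast; ring,
    PySem.List.slice_natCast]
  have hlenP : ((PySem.List.pyRange 0 (i : Int) 1).flatMap blk).length = i * w := by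
    rw [List.length_flatMap,
      List.map_congr_left (g := fun _ => w) (fun x hx => by
        have hm := PySem.List.mem_pyRange_one.1 hx
        exact hw x hm.1 (by omega)),
      List.map_const', List.sum_replicate, smul_eq_mul, PySem.List.length_pyRange_one]
    simp
  have hstep : (i + 1) * w - i * w = w := by rw [Nat.succ_mul]; omega
  rw [hstep, ← hlenP, List.drop_left, ← hw (i : Int) (Int.natCast_nonneg i) (by exact_mod_cast hi),
    List.take_left]

theorem pv_flatMap_triple_map {α : Type} (A B C' : List Int) (F : Int → Int → Int → α) :
    A.flatMap (fun c => B.flatMap (fun m => C'.map (fun n => F c m n)))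
    = (A.flatMap (fun c => B.flatMap (fun m => C'.map (fun n => (c, m, n))))).map
        (fun t => F t.1 t.2.1 t.2.2) := by
  simp [List.map_flatMap, List.map_map, Function.comp_def]

theorem pv_val_eq_sum (A B C' : List Int) (f : Int → Int → Int → Int) :
    A.foldl (fun val c => B.foldl (fun val m => C'.foldl (fun val n => val + f c m n) val) val) 0
    = (A.flatMap (fun c => B.flatMap (fun m => C'.map (fun n => f c m n)))).sum := by
  simp only [PySem.List.foldl_add, pv_sum_flatMap, zero_add]

theorem pv_entry (A B C' : List Int) (fa fk : Int → Int → Int → Int) :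
    A.foldl (fun val c => B.foldl (fun val m => C'.foldl (fun val n => val + fa c m n * fk c m n) val) val) 0
    = (((A.flatMap (fun c => B.flatMap (fun m => C'.map (fun n => fa c m n)))).zip
        (A.flatMap (fun c => B.flatMap (fun m => C'.map (fun n => fk c m n))))).map
        (fun pk => pk.1 * pk.2)).sum := by
  rw [pv_val_eq_sum, pv_flatMap_triple_map A B C' fa, pv_flatMap_triple_map A B C' fk,
    List.zip_map', List.map_map, pv_flatMap_triple_map A B C' (fun c m n => fa c m n * fk c m n)]
  rfl

theorem pv_main (image kernel : List (List (List Int))) (C kH kW outH outW : Int) :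
    (PySem.List.pyRange 0 outH 1).foldl (fun output i =>
      (PySem.List.pyRange 0 outW 1).foldl (fun output j =>
        PySem.List.pySetD output i (PySem.List.pySetD (PySem.List.pyGetD output i []) j
          ((PySem.List.pyRange 0 C 1).foldl (fun val c =>
            (PySem.List.pyRange 0 kH 1).foldl (fun val m =>
              (PySem.List.pyRange 0 kW 1).foldl (fun val n =>
                val + pvGet3 image c (i + m) (j + n) * pvGet3 kernel c m n) val) val) 0))) output)
      ((PySem.List.pyRange 0 outH 1).map (fun _ => (PySem.List.pyRange 0 outW 1).map (fun _ => (0 : Int))))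
    = (PySem.List.pyRange 0 outH 1).map (fun i =>
        PySem.List.slice
          (((PySem.List.pyRange 0 outH 1).flatMap (fun i =>
            (PySem.List.pyRange 0 outW 1).map (fun j =>
              (PySem.List.pyRange 0 C 1).flatMap (fun c =>
                (PySem.List.pyRange 0 kH 1).flatMap (fun m =>
                  (PySem.List.pyRange 0 kW 1).map (fun n => pvGet3 image c (i + m) (j + n))))))).map
            (fun row => ((row.zip ((PySem.List.pyRange 0 C 1).flatMap (fun c =>
              (PySem.List.pyRange 0 kH 1).flatMap (fun m =>
                (PySem.List.pyRange 0 kW 1).map (fun n => pvGet3 kernel c m n))))).map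
              (fun pk => pk.1 * pk.2)).sum))
          (some (i * outW)) (some ((i + 1) * outW))) := by
  have hE : ∀ i j : Int,
      (PySem.List.pyRange 0 C 1).foldl (fun val c =>
        (PySem.List.pyRange 0 kH 1).foldl (fun val m =>
          (PySem.List.pyRange 0 kW 1).foldl (fun val n =>
            val + pvGet3 image c (i + m) (j + n) * pvGet3 kernel c m n) val) val) 0
      = (List.map (fun pk => pk.1 * pk.2)
          (((PySem.List.pyRange 0 C 1).flatMap (fun c =>
              (PySem.List.pyRange 0 kH 1).flatMap (fun m =>
                (PySem.List.pyRange 0 kW 1).map (fun n => pvGet3 image c (i + m) (j + n))))).zip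
           ((PySem.List.pyRange 0 C 1).flatMap (fun c =>
              (PySem.List.pyRange 0 kH 1).flatMap (fun m =>
                (PySem.List.pyRange 0 kW 1).map (fun n => pvGet3 kernel c m n)))))).sum := fun i j =>
    pv_entry _ _ _ (fun c m n => pvGet3 image c (i + m) (j + n)) (fun c m n => pvGet3 kernel c m n)
  trans ((PySem.List.pyRange 0 outH 1).map (fun i => (PySem.List.pyRange 0 outW 1).map (fun j =>
      (PySem.List.pyRange 0 C 1).foldl (fun val c =>
        (PySem.List.pyRange 0 kH 1).foldl (fun val m =>
          (PySem.List.pyRange 0 kW 1).foldl (fun val n =>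
            val + pvGet3 image c (i + m) (j + n) * pvGet3 kernel c m n) val) val) 0)))
  · -- A side
    by_cases hH : outH ≤ 0
    · simp [PySem.List.pyRange_one_eq_nil hH]
    · push Not at hH
      refine Eq.trans (List.foldl_ext _ _ _
        (fun out i hi => pv_setrow _ _ i (PySem.List.mem_pyRange_one.1 hi).1 out)) ?_
      have hcast : ((outH.toNat : Nat) : Int) = outH := Int.toNat_of_nonneg hH.le
      have h2 := pv_foldl_set_get (α := List Int) outH []
        (fun _ => (PySem.List.pyRange 0 outW 1).map (fun _ => (0 : Int)))
        (fun i row => (PySem.List.pyRange 0 outW 1).foldl (fun row j => PySem.List.pySetD row j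
          ((PySem.List.pyRange 0 C 1).foldl (fun val c =>
            (PySem.List.pyRange 0 kH 1).foldl (fun val m =>
              (PySem.List.pyRange 0 kW 1).foldl (fun val n =>
                val + pvGet3 image c (i + m) (j + n) * pvGet3 kernel c m n) val) val) 0)) row)
        outH.toNat (le_of_eq hcast)
      rw [hcast] at h2
      refine h2.trans ?_
      apply List.map_congr_left
      intro i hi
      rw [if_pos (PySem.List.mem_pyRange_one.1 hi).2]
      by_cases hW : outW ≤ 0
      · rw [PySem.List.pyRange_one_eq_nil hW]; simp
      · push Not at hW
        have hcastW : ((outW.toNat : Nat) : Int) = outW := Int.toNat_of_nonneg hW.le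
        have h3 := pv_foldl_set_get (α := Int) outW 0 (fun _ => (0 : Int))
          (fun j _ => (PySem.List.pyRange 0 C 1).foldl (fun val c =>
            (PySem.List.pyRange 0 kH 1).foldl (fun val m =>
              (PySem.List.pyRange 0 kW 1).foldl (fun val n =>
                val + pvGet3 image c (i + m) (j + n) * pvGet3 kernel c m n) val) val) 0)
          outW.toNat (le_of_eq hcastW)
        rw [hcastW] at h3
        refine h3.trans ?_
        apply List.map_congr_left
        intro j hj
        rw [if_pos (PySem.List.mem_pyRange_one.1 hj).2]
  · -- B side
    rw [List.map_flatMap]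
    simp only [List.map_map, Function.comp_def]
    by_cases hH : outH ≤ 0
    · rw [PySem.List.pyRange_one_eq_nil hH]; simp
    · push Not at hH
      by_cases hW : outW ≤ 0
      · rw [PySem.List.pyRange_one_eq_nil hW]
        have hfm : (PySem.List.pyRange 0 outH 1).flatMap (fun _ : Int => ([] : List Int)) = [] := by
          simp
        simp [PySem.List.slice, hfm, List.map_const', PySem.List.length_pyRange_one]
      · push Not at hW
        have hcastW : ((outW.toNat : Nat) : Int) = outW := Int.toNat_of_nonneg hW.le
        have hcastH : ((outH.toNat : Nat) : Int) = outH := Int.toNat_of_nonneg hH.le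
        apply List.map_congr_left
        intro i hi
        have hm := PySem.List.mem_pyRange_one.1 hi
        have hs := pv_slice_flatMap (α := Int) outH.toNat outW.toNat
          (fun x => (PySem.List.pyRange 0 outW 1).map (fun j =>
            (((PySem.List.pyRange 0 C 1).flatMap (fun c =>
              (PySem.List.pyRange 0 kH 1).flatMap (fun m =>
                (PySem.List.pyRange 0 kW 1).map (fun n => pvGet3 image c (x + m) (j + n))))).zip
              ((PySem.List.pyRange 0 C 1).flatMap (fun c =>
                (PySem.List.pyRange 0 kH 1).flatMap (fun m =>
                  (PySem.List.pyRange 0 kW 1).map (fun n => pvGet3 kernel c m n))))).map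
              (fun pk => pk.1 * pk.2) |>.sum))
          (fun x _ _ => by simp [PySem.List.length_pyRange_one])
          i.toNat (by omega)
        rw [hcastH, hcastW, Int.toNat_of_nonneg hm.1] at hs
        rw [hs]
        apply List.map_congr_left
        intro j hj
        exact hE i j



theorem pv_main2 (image kernel : List (List (List Int))) (C kH kW outH outW : Int) :
    (PySem.List.pyRange 0 outH 1).foldl (fun output i =>
      (PySem.List.pyRange 0 outW 1).foldl (fun output j =>
        PySem.List.pySetD output i (PySem.List.pySetD (PySem.List.pyGetD output i []) j
          ((PySem.List.pyRange 0 C 1).foldl (fun val c =>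
            (PySem.List.pyRange 0 kH 1).foldl (fun val m =>
              (PySem.List.pyRange 0 kW 1).foldl (fun val n =>
                val + pvGet3 image c (i + m) (j + n) * pvGet3 kernel c m n) val) val) 0))) output)
      ((PySem.List.pyRange 0 outH 1).map (fun _ => (PySem.List.pyRange 0 outW 1).map (fun _ => (0 : Int))))
    = if outH ≤ 0 ∨ outW ≤ 0 then
        (PySem.List.pyRange 0 outH 1).map (fun _ => ([] : List Int))
      else
        (PySem.List.pyRange 0 outH 1).map (fun i =>
          PySem.List.slice
            (((PySem.List.pyRange 0 outH 1).flatMap (fun i =>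
              (PySem.List.pyRange 0 outW 1).map (fun j =>
                (PySem.List.pyRange 0 C 1).flatMap (fun c =>
                  (PySem.List.pyRange 0 kH 1).flatMap (fun m =>
                    (PySem.List.pyRange 0 kW 1).map (fun n => pvGet3 image c (i + m) (j + n))))))).map
              (fun row => ((row.zip ((PySem.List.pyRange 0 C 1).flatMap (fun c =>
                (PySem.List.pyRange 0 kH 1).flatMap (fun m =>
                  (PySem.List.pyRange 0 kW 1).map (fun n => pvGet3 kernel c m n))))).map
                (fun pk => pk.1 * pk.2)).sum))
            (some (i * outW)) (some ((i + 1) * outW))) := by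
  split_ifs with h
  · rcases h with h | h
    · simp [PySem.List.pyRange_one_eq_nil h]
    · rw [PySem.List.pyRange_one_eq_nil h]
      simp
  · exact pv_main image kernel C kH kW outH outW

-- ===== VERDICT (by name: the statement is the Claim_ definition above) =====
theorem convolve3d_spec : Claim_equal_convolve3d := by
  intro image kernel _ _
  unfold Spec_convolve3d convolve3d convolve3d_alt
  exact pv_main2 image kernel _ _ _ _ _
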